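-- pv_equiv track=rewrite | github.com/cx3196463021/three_sun | main.py | _count_single_day_segments
-- ===== SOURCE A (Python) =====
-- def _count_single_day_segments(indices):
--     """计算长度为1的涨停段个数（单日涨停）"""
--     if not indices:
--         return 0
--     singles = 0
--     run_len = 1
--     for i in range(1, len(indices)):
--         if indices[i] == indices[i - 1] + 1:
--             run_len += 1
--         else:
--             if run_len == 1:
--                 singles += 1
--             run_len = 1
--     if run_len == 1:
--         singles += 1
--     return singles
-- ===== SOURCE B (Python) =====
-- def _count_single_day_segments(indices):
--     """计算长度为1的涨停段个数（单日涨停）"""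
--     gaps = [b == a + 1 for a, b in zip(indices, indices[1:])]
--     return sum(1 for _, left, right in zip(indices, [False] + gaps, gaps + [False])
--                if not left and not right)
-- ===== Notes on version B (the rewrite author's own statement) =====
-- stated objective: simpler
-- what changed: Replaces the stateful run-length accumulator loop with a local classification: each element is counted iff neither of its neighbouring gaps is consecutive, computed from a pairwise gap list via zips.
import Mathlib
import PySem

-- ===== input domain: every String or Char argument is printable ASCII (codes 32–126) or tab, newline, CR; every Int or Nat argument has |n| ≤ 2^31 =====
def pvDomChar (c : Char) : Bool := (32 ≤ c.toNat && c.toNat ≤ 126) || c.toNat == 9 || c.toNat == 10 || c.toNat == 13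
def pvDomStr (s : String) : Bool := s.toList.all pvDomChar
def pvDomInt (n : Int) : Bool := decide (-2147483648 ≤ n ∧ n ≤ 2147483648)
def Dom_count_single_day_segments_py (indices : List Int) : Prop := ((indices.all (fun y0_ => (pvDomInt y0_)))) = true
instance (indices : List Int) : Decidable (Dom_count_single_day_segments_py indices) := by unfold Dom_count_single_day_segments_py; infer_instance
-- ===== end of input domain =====

-- B replaces A's run-length accumulator loop with a local neighbour-gap classification (simpler decomposition, same O(n) cost).

-- ===== PORT A =====
def count_single_day_segments_py (indices : List Int) : Int :=
  if indices = [] then 0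
  else
    let res := (PySem.List.pyRange 1 (indices.length : Int) 1).foldl
      (fun (st : Int × Int) i =>
        if PySem.List.pyGetD indices i 0 = PySem.List.pyGetD indices (i - 1) 0 + 1 then
          (st.1, st.2 + 1)
        else
          if st.2 = 1 then (st.1 + 1, 1) else (st.1, 1))
      (0, 1)
    res.1 + (if res.2 = 1 then 1 else 0)

-- ===== PORT B =====
def count_single_day_segments_py_alt (indices : List Int) : Int :=
  let gaps : List Bool :=
    (indices.zip (PySem.List.slice indices (some 1) none)).map (fun p => p.2 == p.1 + 1)
  ((indices.zip ((false :: gaps).zip (gaps ++ [false]))).map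
      (fun p => if !p.2.1 && !p.2.2 then (1 : Int) else 0)).sum

-- ===== PRECONDITION & SPEC =====
def Spec_count_single_day_segments_py (indices : List Int) (out : Int) : Prop := out = count_single_day_segments_py_alt indices
instance (indices : List Int) (out : Int) : Decidable (Spec_count_single_day_segments_py indices out) := by unfold Spec_count_single_day_segments_py; infer_instance

-- ===== CLAIM (what is proved, stated in full; the proofs are below) =====
def Claim_equal_count_single_day_segments_py : Prop := ∀ (indices : List Int), Dom_count_single_day_segments_py indices → Spec_count_single_day_segments_py indices (count_single_day_segments_py indices)

-- ===== LEMMAS AND PROOFS =====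

/-- Count, from a gap list, the elements isolated on both sides (`prev` = gap to the left). -/
def pvC : Bool → List Bool → Int
  | prev, [] => if prev then 0 else 1
  | prev, b :: t => (if !prev && !b then 1 else 0) + pvC b t

/-- A's index loop reads exactly the adjacent pairs of the list. -/
theorem pvL1 (xs : List Int) :
    (PySem.List.pyRange 1 (xs.length : Int) 1).map
        (fun i => (PySem.List.pyGetD xs (i - 1) 0, PySem.List.pyGetD xs i 0))
      = xs.zip xs.tail := by
  apply List.ext_getElem
  · simp [PySem.List.length_pyRange_one, List.length_tail]
  · intro k h1 h2
    have hk : k < xs.length - 1 := by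
      simpa [PySem.List.length_pyRange_one] using h1
    have h1k : (1 : Int) + (k : Int) - 1 = ((k : Nat) : Int) := by omega
    have h1k' : (1 : Int) + (k : Int) = (((k + 1 : Nat)) : Int) := by push_cast; omega
    have h1k'' : ((k : Int)) + 1 = (((k + 1 : Nat)) : Int) := by push_cast; omega
    rw [List.getElem_map, PySem.List.getElem_pyRange_one, List.getElem_zip, List.getElem_tail,
      h1k, h1k', PySem.List.pyGetD_natCast, PySem.List.pyGetD_natCast,
      List.getD_eq_getElem _ _ (by omega : k < xs.length),
      List.getD_eq_getElem _ _ (by omega : k + 1 < xs.length)]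

/-- A's index fold is the same fold over adjacent pairs. -/
theorem pvL1' (xs : List Int) :
    (PySem.List.pyRange 1 (xs.length : Int) 1).foldl
        (fun (st : Int × Int) i =>
          if PySem.List.pyGetD xs i 0 = PySem.List.pyGetD xs (i - 1) 0 + 1 then (st.1, st.2 + 1)
          else if st.2 = 1 then (st.1 + 1, 1) else (st.1, 1)) (0, 1)
      = (xs.zip xs.tail).foldl
          (fun (st : Int × Int) p =>
            if p.2 = p.1 + 1 then (st.1, st.2 + 1)
            else if st.2 = 1 then (st.1 + 1, 1) else (st.1, 1)) (0, 1) := by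
  rw [← pvL1 xs, List.foldl_map]

/-- A's accumulator fold, finalized, counts via `pvC` of the gap booleans. -/
theorem pvL2 (zs : List (Int × Int)) (s r : Int) (hr : 1 ≤ r) :
    (zs.foldl (fun (st : Int × Int) p =>
          if p.2 = p.1 + 1 then (st.1, st.2 + 1)
          else if st.2 = 1 then (st.1 + 1, 1) else (st.1, 1)) (s, r)).1
      + (if (zs.foldl (fun (st : Int × Int) p =>
          if p.2 = p.1 + 1 then (st.1, st.2 + 1)
          else if st.2 = 1 then (st.1 + 1, 1) else (st.1, 1)) (s, r)).2 = 1 then 1 else 0)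
      = s + pvC (decide (r ≠ 1)) (zs.map (fun p => p.2 == p.1 + 1)) := by
  induction zs generalizing s r with
  | nil =>
    by_cases h : r = 1 <;> simp [pvC, h]
  | cons p t ih =>
    simp only [List.foldl_cons, List.map_cons]
    by_cases hg : p.2 = p.1 + 1
    · rw [if_pos hg, ih s (r + 1) (by omega)]
      have hb : (p.2 == p.1 + 1) = true := by simp [hg]
      have h2 : decide (r + 1 ≠ 1) = true := by simp; omega
      rw [hb, h2]
      simp [pvC]
    · rw [if_neg hg]
      have hb : (p.2 == p.1 + 1) = false := by simp [hg]
      by_cases h : r = 1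
      · rw [if_pos h, ih (s + 1) 1 (by omega)]
        rw [hb, h]
        simp [pvC]
        ring
      · rw [if_neg h, ih s 1 (by omega)]
        rw [hb]
        have h2 : decide (r ≠ 1) = true := by simp [h]
        rw [h2]
        simp [pvC]

/-- B's zipped sum computes `pvC`. -/
theorem pvL3 (g : List Bool) (prev : Bool) (xs : List Int)
    (h : xs.length = g.length + 1) :
    ((xs.zip ((prev :: g).zip (g ++ [false]))).map
        (fun p => if !p.2.1 && !p.2.2 then (1 : Int) else 0)).sum = pvC prev g := by
  induction g generalizing prev xs with
  | nil =>
    match xs, h with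
    | [x], _ => cases prev <;> simp [pvC]
  | cons b t ih =>
    match xs, h with
    | x :: xs', h =>
      have h' : xs'.length = t.length + 1 := by simpa using h
      simp only [List.cons_append, List.zip_cons_cons, List.map_cons, List.sum_cons, pvC]
      rw [ih b xs' h']

-- ===== VERDICT (by name: the statement is the Claim_ definition above) =====
theorem count_single_day_segments_py_spec : Claim_equal_count_single_day_segments_py := by
  intro indices _
  unfold Spec_count_single_day_segments_py count_single_day_segments_py count_single_day_segments_py_alt
  by_cases hnil : indices = []
  · simp [hnil]
  · simp only [if_neg hnil, PySem.List.slice_from_one]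
    rw [pvL1' indices, pvL2 _ 0 1 (by omega)]
    have hlen : indices.length = ((indices.zip indices.tail).map
        (fun p => p.2 == p.1 + 1)).length + 1 := by
      cases indices with
      | nil => exact absurd rfl hnil
      | cons a t => simp [List.length_zip]
    rw [pvL3 _ false indices hlen]
    simp
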